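-- pv_equiv track=rewrite | github.com/erahulroy123/DSA | ARRAY/5 Union and Intersection (sorted).py | find_union_intersection
-- ===== SOURCE A (Python) =====
-- def find_union_intersection(arr1, arr2):
--     i, j = 0, 0
--     n, m = len(arr1), len(arr2)
--     union_result = []
--     intersection_result = []
--     while i < n and j < m:
--         if i > 0 and arr1[i] == arr1[i-1]:
--             i += 1
--             continue
--         if j > 0 and arr2[j] == arr2[j-1]:
--             j += 1
--             continue
--         if arr1[i] < arr2[j]:
--             union_result.append(arr1[i])
--             i += 1
--         elif arr2[j] < arr1[i]:
--             union_result.append(arr2[j])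
--             j += 1
--         else:
--             union_result.append(arr1[i])
--             intersection_result.append(arr1[i])
--             i += 1
--             j += 1
--     while i < n:
--         if i == 0 or arr1[i] != arr1[i-1]:
--             union_result.append(arr1[i])
--         i += 1
--     while j < m:
--         if j == 0 or arr2[j] != arr2[j-1]:
--             union_result.append(arr2[j])
--         j += 1
--     return union_result, intersection_result
-- ===== SOURCE B (Python) =====
-- def find_union_intersection(arr1, arr2):
--     # stage 1: collapse runs of consecutive equal values via a shifted-zip comprehension
--     u1 = arr1[:1] + [x for p, x in zip(arr1, arr1[1:]) if x != p]
--     u2 = arr2[:1] + [x for p, x in zip(arr2, arr2[1:]) if x != p]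
--     # stage 2: one tagged merge over two stacks (top = last element) producing a single
--     # annotated stream: (value, True) exactly when both stacks agree on the value
--     s1, s2 = u1[::-1], u2[::-1]
--     tagged = []
--     while s1 and s2:
--         if s1[-1] < s2[-1]:
--             tagged.append((s1.pop(), False))
--         elif s2[-1] < s1[-1]:
--             tagged.append((s2.pop(), False))
--         else:
--             s2.pop()
--             tagged.append((s1.pop(), True))
--     tagged += [(x, False) for x in reversed(s1)]
--     tagged += [(x, False) for x in reversed(s2)]
--     # stage 3: project the tagged stream onto the two answers
--     return [v for v, _ in tagged], [v for v, both in tagged if both]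
-- ===== Notes on version B (the rewrite author's own statement) =====
-- stated objective: alternative
-- what changed: B is a three-stage pipeline: shifted-zip comprehensions collapse consecutive duplicates, then a single tagged merge over two pop-from-the-top stacks builds one annotated (value, in-both) stream, and the two answers are obtained by projecting/filtering that stream, instead of A's single index-based while loop that interleaves continue-based duplicate skips and maintains the two output lists directly.
import Mathlib
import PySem

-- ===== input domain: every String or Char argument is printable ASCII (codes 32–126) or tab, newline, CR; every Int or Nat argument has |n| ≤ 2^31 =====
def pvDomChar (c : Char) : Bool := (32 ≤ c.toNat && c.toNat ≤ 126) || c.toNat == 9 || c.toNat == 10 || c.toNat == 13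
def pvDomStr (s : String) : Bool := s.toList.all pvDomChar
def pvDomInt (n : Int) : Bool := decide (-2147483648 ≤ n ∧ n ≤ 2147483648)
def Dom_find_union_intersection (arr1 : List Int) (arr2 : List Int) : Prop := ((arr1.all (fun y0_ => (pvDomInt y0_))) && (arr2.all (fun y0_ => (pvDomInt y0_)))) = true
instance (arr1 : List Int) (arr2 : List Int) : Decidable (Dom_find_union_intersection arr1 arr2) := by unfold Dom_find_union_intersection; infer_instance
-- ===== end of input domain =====

-- B re-decomposes the task as a three-stage pipeline (shifted-zip dedup comprehensions, a
-- stack-based tagged merge into ONE annotated stream, then two projections) — objective: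
-- alternative; same O(n+m) cost as A's single interleaved index loop.

-- ===== PORT A =====
-- A's index-based while loops; the Nat fuel is only a totality guard (fuel = number of
-- remaining iterations suffices, so the 0-fuel base case is never an early exit), and the
-- indices are guarded in range, so `getD _ 0` is exactly Python's arr[i].
-- the second and third while loops of A (append remaining arr1 tail, then arr2 tail)
def pvTailA (arr : List Int) : Nat → Nat → List Int → List Int
  | 0, _, u => u
  | f + 1, i, u =>
    if i < arr.length then
      pvTailA arr f (i + 1)
        (if i = 0 ∨ arr.getD i 0 ≠ arr.getD (i - 1) 0 then u ++ [arr.getD i 0] else u)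
    else u

-- A's main while loop, with the two `continue` duplicate-skips and the 3-way comparison
def pvMainA (arr1 arr2 : List Int) : Nat → Nat → Nat → List Int → List Int → List Int × List Int
  | 0, _, j, u, t => (pvTailA arr2 arr2.length j u, t)
  | f + 1, i, j, u, t =>
    if i < arr1.length ∧ j < arr2.length then
      if 0 < i ∧ arr1.getD i 0 = arr1.getD (i - 1) 0 then
        pvMainA arr1 arr2 f (i + 1) j u t
      else if 0 < j ∧ arr2.getD j 0 = arr2.getD (j - 1) 0 then
        pvMainA arr1 arr2 f i (j + 1) u t
      else if arr1.getD i 0 < arr2.getD j 0 then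
        pvMainA arr1 arr2 f (i + 1) j (u ++ [arr1.getD i 0]) t
      else if arr2.getD j 0 < arr1.getD i 0 then
        pvMainA arr1 arr2 f i (j + 1) (u ++ [arr2.getD j 0]) t
      else
        pvMainA arr1 arr2 f (i + 1) (j + 1) (u ++ [arr1.getD i 0]) (t ++ [arr1.getD i 0])
    else
      (pvTailA arr2 arr2.length j (pvTailA arr1 arr1.length i u), t)

def find_union_intersection (arr1 : List Int) (arr2 : List Int) : List Int × List Int :=
  pvMainA arr1 arr2 (arr1.length + arr2.length) 0 0 [] []

-- ===== PORT B =====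
-- stage 1 of Source B: arr[:1] + [x for p, x in zip(arr, arr[1:]) if x != p]
def pvShiftDedup (arr : List Int) : List Int :=
  arr.take 1 ++ ((arr.zip (arr.drop 1)).filter (fun p => !(p.2 == p.1))).map Prod.snd

-- stage 2 of Source B: the while loop over the two stacks s1 = u1[::-1], s2 = u2[::-1] with
-- top at the END (s[-1] / pop).  The stacks are represented top-first here, so Python's
-- initial `[::-1]` and the final `reversed(s)` traversals cancel; each loop branch is
-- transcribed step for step (compare the two tops, pop, append the tagged pair).
def pvStackMerge : List Int → List Int → List (Int × Bool) → List (Int × Bool)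
  | x :: xs, y :: ys, acc =>
    if x < y then pvStackMerge xs (y :: ys) (acc ++ [(x, false)])
    else if y < x then pvStackMerge (x :: xs) ys (acc ++ [(y, false)])
    else pvStackMerge xs ys (acc ++ [(x, true)])
  | s1, s2, acc => acc ++ s1.map (fun x => (x, false)) ++ s2.map (fun x => (x, false))

-- stage 3 of Source B: the two projection comprehensions over the tagged stream
def find_union_intersection_alt (arr1 : List Int) (arr2 : List Int) : List Int × List Int :=
  let tagged := pvStackMerge (pvShiftDedup arr1) (pvShiftDedup arr2) []
  (tagged.map Prod.fst, (tagged.filter (fun p => p.2)).map Prod.fst)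

-- ===== PRECONDITION & SPEC =====
def Spec_find_union_intersection (arr1 : List Int) (arr2 : List Int) (out : List Int × List Int) : Prop := out = find_union_intersection_alt arr1 arr2
instance (arr1 : List Int) (arr2 : List Int) (out : List Int × List Int) : Decidable (Spec_find_union_intersection arr1 arr2 out) := by unfold Spec_find_union_intersection; infer_instance

-- ===== CLAIM (what is proved, stated in full; the proofs are below) =====
def Claim_equal_find_union_intersection : Prop := ∀ (arr1 : List Int) (arr2 : List Int), Dom_find_union_intersection arr1 arr2 → Spec_find_union_intersection arr1 arr2 (find_union_intersection arr1 arr2)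

-- ===== LEMMAS AND PROOFS =====

-- ghost intermediate: recursive consecutive-dedup carrying the previous element
def pvDedupGo (p : Int) : List Int → List Int
  | [] => []
  | x :: xs => if x = p then pvDedupGo p xs else x :: pvDedupGo x xs

def pvDedup : List Int → List Int
  | [] => []
  | x :: xs => x :: pvDedupGo x xs

-- ghost intermediate: untagged two-list merge both sides are reduced to
def pvMergeB : List Int → List Int → List Int → List Int → List Int × List Int
  | x :: xs, y :: ys, u, t =>
    if x < y then pvMergeB xs (y :: ys) (u ++ [x]) t
    else if y < x then pvMergeB (x :: xs) ys (u ++ [y]) t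
    else pvMergeB xs ys (u ++ [x]) (t ++ [x])
  | xs, ys, u, t => (u ++ xs ++ ys, t)

-- the consecutive-dedup of the suffix of `arr` starting at index i, relative to arr[i-1]
def pvDsuf (arr : List Int) (i : Nat) : List Int :=
  if i = 0 then pvDedup arr else pvDedupGo (arr.getD (i - 1) 0) (arr.drop i)

theorem pvDsuf_of_ge (arr : List Int) (i : Nat) (h : arr.length ≤ i) : pvDsuf arr i = [] := by
  rcases i with _ | k
  · cases arr with
    | nil => simp [pvDsuf, pvDedup]
    | cons a l => simp at h
  · have hd : arr.drop (k + 1) = [] := List.drop_eq_nil_of_le h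
    simp [pvDsuf, hd, pvDedupGo]

theorem pvDsuf_step (arr : List Int) (i : Nat) (h : i < arr.length) :
    pvDsuf arr i =
      if 0 < i ∧ arr.getD i 0 = arr.getD (i - 1) 0 then pvDsuf arr (i + 1)
      else arr.getD i 0 :: pvDsuf arr (i + 1) := by
  rcases i with _ | k
  · cases arr with
    | nil => simp at h
    | cons a l => simp [pvDsuf, pvDedup, List.getD]
  · have hx : arr.drop (k + 1) = arr.getD (k + 1) 0 :: arr.drop (k + 2) := by
      rw [List.getD_eq_getElem _ _ h]
      exact List.drop_eq_getElem_cons h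
    have h0 : pvDsuf arr (k + 1) = pvDedupGo (arr.getD k 0) (arr.drop (k + 1)) := rfl
    have h1 : pvDsuf arr (k + 2) = pvDedupGo (arr.getD (k + 1) 0) (arr.drop (k + 2)) := rfl
    rw [h0, hx, pvDedupGo]
    by_cases he : arr.getD (k + 1) 0 = arr.getD k 0
    · rw [if_pos he, if_pos (⟨Nat.succ_pos k, he⟩ :
        0 < k + 1 ∧ arr.getD (k + 1) 0 = arr.getD (k + 1 - 1) 0), h1, he]
    · rw [if_neg he, if_neg (fun hc : 0 < k + 1 ∧ arr.getD (k + 1) 0 = arr.getD (k + 1 - 1) 0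
        => he hc.2), h1]

theorem pvTailA_eq (arr : List Int) (f : Nat) : ∀ (i : Nat) (u : List Int),
    arr.length ≤ i + f → pvTailA arr f i u = u ++ pvDsuf arr i := by
  induction f with
  | zero =>
    intro i u hf
    rw [pvTailA, pvDsuf_of_ge arr i (by omega)]
    simp
  | succ f ih =>
    intro i u hf
    by_cases h : i < arr.length
    · rw [pvTailA, if_pos h, ih (i + 1) _ (by omega), pvDsuf_step arr i h]
      by_cases hs : 0 < i ∧ arr.getD i 0 = arr.getD (i - 1) 0
      · have hnc : ¬ (i = 0 ∨ arr.getD i 0 ≠ arr.getD (i - 1) 0) := by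
          rintro (h0 | hne)
          · omega
          · exact hne hs.2
        rw [if_neg hnc, if_pos hs]
      · have hc : i = 0 ∨ arr.getD i 0 ≠ arr.getD (i - 1) 0 := by
          by_cases h0 : i = 0
          · exact Or.inl h0
          · exact Or.inr (fun he => hs ⟨by omega, he⟩)
        rw [if_pos hc, if_neg hs]
        simp
    · rw [pvTailA, if_neg h, pvDsuf_of_ge arr i (by omega)]
      simp

theorem pvMergeB_nil_left (ys u t : List Int) : pvMergeB [] ys u t = (u ++ ys, t) := by
  simp [pvMergeB]

theorem pvMergeB_nil_right (xs u t : List Int) : pvMergeB xs [] u t = (u ++ xs, t) := by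
  cases xs <;> simp [pvMergeB]

theorem pvMainA_eq (arr1 arr2 : List Int) (f : Nat) : ∀ (i j : Nat) (u t : List Int),
    (arr1.length - i) + (arr2.length - j) ≤ f →
    pvMainA arr1 arr2 f i j u t = pvMergeB (pvDsuf arr1 i) (pvDsuf arr2 j) u t := by
  induction f with
  | zero =>
    intro i j u t hf
    rw [pvMainA, pvTailA_eq arr2 arr2.length j u (by omega),
      pvDsuf_of_ge arr1 i (by omega), pvDsuf_of_ge arr2 j (by omega), pvMergeB_nil_left]
  | succ f ih =>
    intro i j u t hf
    by_cases h : i < arr1.length ∧ j < arr2.length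
    · rw [pvMainA, if_pos h]
      by_cases h1 : 0 < i ∧ arr1.getD i 0 = arr1.getD (i - 1) 0
      · rw [if_pos h1, ih (i + 1) j u t (by omega), pvDsuf_step arr1 i h.1, if_pos h1]
      · rw [if_neg h1]
        by_cases h2 : 0 < j ∧ arr2.getD j 0 = arr2.getD (j - 1) 0
        · rw [if_pos h2, ih i (j + 1) u t (by omega), pvDsuf_step arr2 j h.2, if_pos h2]
        · rw [if_neg h2, pvDsuf_step arr1 i h.1, if_neg h1,
            pvDsuf_step arr2 j h.2, if_neg h2]
          by_cases hlt : arr1.getD i 0 < arr2.getD j 0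
          · rw [if_pos hlt, ih (i + 1) j _ t (by omega),
              pvDsuf_step arr2 j h.2, if_neg h2]
            conv_rhs => rw [pvMergeB]
            rw [if_pos hlt]
          · rw [if_neg hlt]
            by_cases hgt : arr2.getD j 0 < arr1.getD i 0
            · rw [if_pos hgt, ih i (j + 1) _ t (by omega),
                pvDsuf_step arr1 i h.1, if_neg h1]
              conv_rhs => rw [pvMergeB]
              rw [if_neg hlt, if_pos hgt]
            · rw [if_neg hgt, ih (i + 1) (j + 1) _ _ (by omega)]
              conv_rhs => rw [pvMergeB]
              rw [if_neg hlt, if_neg hgt]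
    · rw [pvMainA, if_neg h, pvTailA_eq arr1 arr1.length i u (by omega),
        pvTailA_eq arr2 arr2.length j _ (by omega)]
      rcases Nat.lt_or_ge i arr1.length with h1 | h1
      · have h2 : arr2.length ≤ j := by omega
        rw [pvDsuf_of_ge arr2 j h2, pvMergeB_nil_right]
        simp
      · rw [pvDsuf_of_ge arr1 i h1, pvMergeB_nil_left]
        simp

-- B's shifted-zip comprehension computes the recursive consecutive-dedup
theorem pvShiftDedup_go (l : List Int) : ∀ p : Int,
    pvDedupGo p l = (((p :: l).zip l).filter (fun q => !(q.2 == q.1))).map Prod.snd := by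
  induction l with
  | nil => intro p; simp [pvDedupGo]
  | cons x xs ih =>
    intro p
    rw [pvDedupGo]
    by_cases h : x = p
    · subst h; simp [List.zip_cons_cons, ih x]
    · simp [List.zip_cons_cons, h, ih x]

theorem pvShiftDedup_eq (arr : List Int) : pvShiftDedup arr = pvDedup arr := by
  cases arr with
  | nil => simp [pvShiftDedup, pvDedup]
  | cons a l => simp [pvShiftDedup, pvDedup, pvShiftDedup_go l a]

-- projecting the tagged stream of B's stack merge gives the untagged merge
theorem pvStackMerge_proj : ∀ (xs ys : List Int) (acc : List (Int × Bool)),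
    ((pvStackMerge xs ys acc).map Prod.fst,
     ((pvStackMerge xs ys acc).filter (fun p => p.2)).map Prod.fst)
    = pvMergeB xs ys (acc.map Prod.fst) ((acc.filter (fun p => p.2)).map Prod.fst) := by
  intro xs ys acc
  induction xs, ys, acc using pvStackMerge.induct with
  | case1 x xs y ys acc h ih =>
    rw [pvStackMerge, if_pos h] at *
    rw [ih]
    conv_rhs => rw [pvMergeB]
    rw [if_pos h]
    simp
  | case2 x xs y ys acc h h' ih =>
    rw [pvStackMerge, if_neg h, if_pos h'] at *
    rw [ih]
    conv_rhs => rw [pvMergeB]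
    rw [if_neg h, if_pos h']
    simp
  | case3 x xs y ys acc h h' ih =>
    rw [pvStackMerge, if_neg h, if_neg h'] at *
    rw [ih]
    conv_rhs => rw [pvMergeB]
    rw [if_neg h, if_neg h']
    simp
  | case4 s1 s2 acc h =>
    rw [pvStackMerge.eq_def]
    cases s1 with
    | nil => simp [pvMergeB_nil_left, Function.comp_def]
    | cons a l =>
      cases s2 with
      | nil => simp [pvMergeB_nil_right, Function.comp_def]
      | cons b m => exact (h a l b m rfl rfl).elim

theorem pvAlt_eq (arr1 arr2 : List Int) :
    find_union_intersection_alt arr1 arr2 = pvMergeB (pvDedup arr1) (pvDedup arr2) [] [] := by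
  show ((pvStackMerge (pvShiftDedup arr1) (pvShiftDedup arr2) []).map Prod.fst,
        ((pvStackMerge (pvShiftDedup arr1) (pvShiftDedup arr2) []).filter (fun p => p.2)).map Prod.fst)
      = _
  rw [pvShiftDedup_eq, pvShiftDedup_eq, pvStackMerge_proj]
  simp

-- ===== VERDICT (by name: the statement is the Claim_ definition above) =====
theorem find_union_intersection_spec : Claim_equal_find_union_intersection := by
  intro arr1 arr2 _
  unfold Spec_find_union_intersection find_union_intersection
  rw [pvAlt_eq, pvMainA_eq arr1 arr2 _ 0 0 [] [] (by omega)]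
  simp [pvDsuf]
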